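-- pv_equiv track=rewrite | github.com/lllDavid/Python | test/test2.py | insert_and_shift
-- ===== SOURCE A (Python) =====
-- def insert_and_shift(arr, index, value):
--     if index < 0 or index > len(arr):
--         raise IndexError("Index out of bounds")
--     arr.append(None)
--     for i in range(len(arr) - 1, index, -1):
--         arr[i] = arr[i - 1]
--     arr[index] = value
--     return arr
-- ===== SOURCE B (Python) =====
-- def insert_and_shift(arr, index, value):
--     if index < 0 or index > len(arr):
--         raise IndexError("Index out of bounds")
--     arr[:] = arr[:index] + [value] + arr[index:]
--     return arr
-- ===== Notes on version B (the rewrite author's own statement) =====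
-- stated objective: simpler
-- what changed: Replaces append-None plus an element-by-element rightward shift loop with a single slice-and-concatenate rebuild assigned back in place (arr[:] = arr[:index] + [value] + arr[index:]).
import Mathlib
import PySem

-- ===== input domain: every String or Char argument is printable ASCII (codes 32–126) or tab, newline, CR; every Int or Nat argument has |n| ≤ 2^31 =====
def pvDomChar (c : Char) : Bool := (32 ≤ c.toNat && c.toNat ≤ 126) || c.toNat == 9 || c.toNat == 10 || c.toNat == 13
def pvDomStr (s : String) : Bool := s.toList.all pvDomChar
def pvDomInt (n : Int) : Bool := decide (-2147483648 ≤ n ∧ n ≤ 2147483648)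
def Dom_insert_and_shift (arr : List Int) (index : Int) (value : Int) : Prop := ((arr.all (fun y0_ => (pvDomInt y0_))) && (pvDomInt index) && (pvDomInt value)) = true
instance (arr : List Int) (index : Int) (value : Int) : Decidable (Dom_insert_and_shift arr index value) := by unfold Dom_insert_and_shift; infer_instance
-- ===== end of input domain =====

-- B changes the return value computation only by slice-rebuild; both A and B mutate arr in place in Python,
-- the equivalence proved here is about the RETURN value.

-- ===== PORT A =====
-- arr.append(None): the placeholder 0 stands for None; on every Pre_ input the loop/final
-- assignment overwrites it before return, so its value never reaches the output.
def insert_and_shift (arr : List Int) (index : Int) (value : Int) : List Int :=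
  let arr1 := arr ++ [0]
  let arr2 := (PySem.List.pyRange ((arr1.length : Int) - 1) index (-1)).foldl
      (fun a i => PySem.List.pySetD a i (PySem.List.pyGetD a (i - 1) 0)) arr1
  PySem.List.pySetD arr2 index value

-- ===== PORT B =====
def insert_and_shift_alt (arr : List Int) (index : Int) (value : Int) : List Int :=
  PySem.List.slice arr none (some index) ++ [value] ++ PySem.List.slice arr (some index) none

-- ===== PRECONDITION & SPEC =====
-- A raises IndexError exactly when index < 0 or index > len(arr); those inputs are outside Pre_.
def Pre_insert_and_shift (arr : List Int) (index : Int) (value : Int) : Prop :=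
  0 ≤ index ∧ index ≤ (arr.length : Int)
instance (arr : List Int) (index : Int) (value : Int) : Decidable (Pre_insert_and_shift arr index value) := by unfold Pre_insert_and_shift; infer_instance

def pvWitness_insert_and_shift : List Int × Int × Int := ([3, 1, 4], 1, 9)

def Spec_insert_and_shift (arr : List Int) (index : Int) (value : Int) (out : List Int) : Prop := out = insert_and_shift_alt arr index value
instance (arr : List Int) (index : Int) (value : Int) (out : List Int) : Decidable (Spec_insert_and_shift arr index value out) := by unfold Spec_insert_and_shift; infer_instance

-- ===== CLAIM (what is proved, stated in full; the proofs are below) =====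
def Claim_equal_insert_and_shift : Prop := ∀ (arr : List Int) (index : Int) (value : Int), Dom_insert_and_shift arr index value → Pre_insert_and_shift arr index value → Spec_insert_and_shift arr index value (insert_and_shift arr index value)

-- ===== LEMMAS AND PROOFS =====

-- Characterisation of A's shift loop: folding range(a, n, -1) over xs (reading i-1, writing i)
-- keeps the length and moves every entry at position n < j ≤ a one slot to the right.
theorem shift_fold_char (k : Nat) : ∀ (xs : List Int) (a n : Int), 0 ≤ n → a - n = (k : Int) →
    a < (xs.length : Int) →
    (((PySem.List.pyRange a n (-1)).foldl
        (fun l i => PySem.List.pySetD l i (PySem.List.pyGetD l (i - 1) 0)) xs).length = xs.length ∧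
     ∀ j : Nat, PySem.List.pyGetD ((PySem.List.pyRange a n (-1)).foldl
        (fun l i => PySem.List.pySetD l i (PySem.List.pyGetD l (i - 1) 0)) xs) (j : Int) 0 =
        if n < (j : Int) ∧ (j : Int) ≤ a then PySem.List.pyGetD xs ((j : Int) - 1) 0
        else PySem.List.pyGetD xs (j : Int) 0) := by
  induction k with
  | zero =>
    intro xs a n hn hk ha
    have : a ≤ n := by omega
    rw [PySem.List.pyRange_neg_one_eq_nil this]
    refine ⟨rfl, fun j => ?_⟩
    have : ¬ (n < (j : Int) ∧ (j : Int) ≤ a) := by omega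
    simp [this]
  | succ k ih =>
    intro xs a n hn hk ha
    have hna : n < a := by omega
    rw [PySem.List.pyRange_neg_one_cons hna]
    simp only [List.foldl_cons]
    set xs' := PySem.List.pySetD xs a (PySem.List.pyGetD xs (a - 1) 0) with hxs'
    have hlen' : xs'.length = xs.length := PySem.List.length_pySetD xs a _
    have ha' : a - 1 < (xs'.length : Int) := by rw [hlen']; omega
    obtain ⟨hL, hP⟩ := ih xs' (a - 1) n hn (by omega) ha'
    have hget : ∀ m : Int, 0 ≤ m → PySem.List.pyGetD xs' m 0 =
        if m = a then PySem.List.pyGetD xs (a - 1) 0 else PySem.List.pyGetD xs m 0 := by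
      intro m hm
      have hma : a = ((a.toNat : Nat) : Int) := by omega
      have hmm : m = ((m.toNat : Nat) : Int) := by omega
      rw [hxs', hma, hmm, PySem.List.pyGetD_pySetD_natCast xs a.toNat m.toNat _ _ (by omega)]
      by_cases h : m.toNat = a.toNat
      · simp [h]
      · have h' : ¬ (((m.toNat : Nat) : Int) = ((a.toNat : Nat) : Int)) := by omega
        rw [if_neg h, if_neg h']
    refine ⟨by rw [hL, hlen'], fun j => ?_⟩
    rw [hP j]
    by_cases h1 : n < (j : Int) ∧ (j : Int) ≤ a - 1
    · rw [if_pos h1, if_pos (by omega : n < (j : Int) ∧ (j : Int) ≤ a),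
        hget _ (by omega), if_neg (by omega : ¬ ((j : Int) - 1 = a))]
    · by_cases h2 : (j : Int) = a
      · rw [if_neg h1, if_pos (by omega : n < (j : Int) ∧ (j : Int) ≤ a),
          hget _ (by omega), if_pos h2, h2]
      · by_cases h3 : n < (j : Int) ∧ (j : Int) ≤ a
        · exact absurd h3 (by omega)
        · rw [if_neg h1, if_neg h3, hget _ (by omega), if_neg h2]

-- getD at every index (plus equal lengths) determines a list
theorem getD_ext (xs ys : List Int) (hlen : xs.length = ys.length)
    (h : ∀ j : Nat, xs.getD j 0 = ys.getD j 0) : xs = ys := by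
  apply List.ext_getElem hlen
  intro j h1 h2
  have := h j
  rwa [List.getD_eq_getElem xs 0 h1, List.getD_eq_getElem ys 0 h2] at this

-- the appended 0 placeholder coincides with getD's default
theorem getD_append_zero (arr : List Int) (j : Nat) :
    (arr ++ [(0 : Int)]).getD j 0 = arr.getD j 0 := by
  by_cases h : j < arr.length
  · rw [List.getD_eq_getElem _ _ (by simp; omega), List.getD_eq_getElem _ _ h,
      List.getElem_append_left h]
  · by_cases h2 : j = arr.length
    · rw [List.getD_eq_getElem _ _ (by simp; omega)]
      simp [h2, List.getD_eq_default, List.getElem_append_right]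
    · rw [List.getD_eq_default _ _ (by simp; omega), List.getD_eq_default _ _ (by omega)]

-- ===== VERDICT (by name: the statement is the Claim_ definition above) =====
theorem insert_and_shift_spec : Claim_equal_insert_and_shift := by
  intro arr index value _ hpre
  obtain ⟨h0, hle⟩ := hpre
  unfold Spec_insert_and_shift insert_and_shift insert_and_shift_alt
  simp only []
  set nt := index.toNat with hnt
  have hi : index = ((nt : Nat) : Int) := by omega
  have hn : nt ≤ arr.length := by omega
  set arr1 := arr ++ [(0 : Int)] with harr1
  have hlen1 : arr1.length = arr.length + 1 := by simp [harr1]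
  have ha : ((arr1.length : Int) - 1) = (arr.length : Int) := by omega
  obtain ⟨hL, hP⟩ := shift_fold_char (( (arr.length : Int) - index).toNat) arr1
    ((arr1.length : Int) - 1) index h0 (by omega) (by omega)
  set r := (PySem.List.pyRange ((arr1.length : Int) - 1) index (-1)).foldl
      (fun l i => PySem.List.pySetD l i (PySem.List.pyGetD l (i - 1) 0)) arr1 with hr
  have hrlen : r.length = arr.length + 1 := by rw [hL, hlen1]
  rw [hi, PySem.List.pySetD_natCast, PySem.List.slice_to_natCast, PySem.List.slice_from_natCast]
  apply getD_ext
  · simp [hrlen]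
  · intro j
    have hchar : ∀ m : Nat, r.getD m 0 =
        if index < (m : Int) ∧ (m : Int) ≤ (arr.length : Int) then arr1.getD (m - 1) 0
        else arr1.getD m 0 := by
      intro m
      have := hP m
      rw [PySem.List.pyGetD_natCast] at this
      rw [this, ha]
      by_cases hc : index < (m : Int) ∧ (m : Int) ≤ (arr.length : Int)
      · have hm1 : (m : Int) - 1 = ((m - 1 : Nat) : Int) := by omega
        rw [if_pos hc, if_pos hc, hm1, PySem.List.pyGetD_natCast]
      · rw [if_neg hc, if_neg hc, PySem.List.pyGetD_natCast]
    -- left side: (r.set nt value).getD j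
    by_cases hj : j = nt
    · subst hj
      rw [List.getD_eq_getElem _ _ (show nt < (r.set nt value).length by simp [hrlen]; omega),
        List.getElem_set, if_pos rfl,
        List.getD_eq_getElem _ _ (show nt < (List.take nt arr ++ [value] ++ List.drop nt arr).length by
          simp [Nat.min_eq_left hn]; omega),
        List.getElem_append_left (by simp [Nat.min_eq_left hn]),
        List.getElem_append_right (by simp [Nat.min_eq_left hn])]
      simp [Nat.min_eq_left hn]
    · have hset : (r.set nt value).getD j 0 = r.getD j 0 := by
        by_cases hjr : j < r.length
        · rw [List.getD_eq_getElem _ _ (by simpa using hjr), List.getD_eq_getElem _ _ hjr,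
            List.getElem_set, if_neg (by omega)]
        · rw [List.getD_eq_default _ _ (by simpa using hjr), List.getD_eq_default _ _ (by omega)]
      rw [hset, hchar j]
      by_cases hlt : j < nt
      · rw [if_neg (by omega), getD_append_zero,
          List.getD_eq_getElem _ _ (by omega),
          List.getD_eq_getElem _ _ (by simp [List.length_take]; omega),
          List.getElem_append_left (by simp [List.length_take]; omega),
          List.getElem_append_left (by simp [List.length_take]; omega)]
        simp [List.getElem_take]
      · -- j > nt here
        have hgt : nt < j := by omega
        have hrhs : (List.take nt arr ++ [value] ++ List.drop nt arr).getD j 0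
            = arr.getD (j - 1) 0 := by
          by_cases hjl : j ≤ arr.length
          · rw [List.getD_eq_getElem _ _ (by simp [List.length_take]; omega),
              List.getD_eq_getElem _ _ (by omega),
              List.getElem_append_right (by simp [List.length_take]; omega)]
            have : (List.drop nt arr)[j - (List.take nt arr ++ [value]).length]'(by
                simp [List.length_take]; omega) = arr[j - 1]'(by omega) := by
              rw [List.getElem_drop]
              congr 1
              simp [List.length_take]; omega
            exact this
          · rw [List.getD_eq_default _ _ (by simp [List.length_take]; omega),
              List.getD_eq_default _ _ (by omega)]
        rw [hrhs]
        by_cases hjl : j ≤ arr.length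
        · rw [if_pos (by constructor <;> omega), getD_append_zero]
        · rw [if_neg (by omega), getD_append_zero,
            List.getD_eq_default _ _ (by omega), List.getD_eq_default _ _ (by omega)]
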